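-- pv_equiv track=rewrite | github.com/g-battaglia/mcp-seo | mcp_seo/crawler.py | _is_blocked_by_robots
-- ===== SOURCE A (Python) =====
-- def _is_blocked_by_robots(path: str, blocked_paths: set[str]) -> bool:
--     """Check if a URL path is blocked by robots.txt disallow rules."""
--     for pattern in blocked_paths:
--         if pattern.endswith("*"):
--             if path.startswith(pattern[:-1]):
--                 return True
--         elif pattern.endswith("$"):
--             if path == pattern[:-1]:
--                 return True
--         elif path.startswith(pattern):
--             return True
--     return False
-- ===== SOURCE B (Python) =====
-- def _is_blocked_by_robots(path: str, blocked_paths: set[str]) -> bool: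
--     """Check if a URL path is blocked by robots.txt disallow rules."""
--     prefix_pats = set()
--     exact_pats = set()
--     for p in blocked_paths:
--         if p.endswith("*"):
--             prefix_pats.add(p[:-1])
--         elif p.endswith("$"):
--             exact_pats.add(p[:-1])
--         else:
--             prefix_pats.add(p)
--     if path in exact_pats:
--         return True
--     return any(path[:i] in prefix_pats for i in range(len(path) + 1))
-- ===== Notes on version B (the rewrite author's own statement) =====
-- stated objective: alternative
-- what changed: B inverts the matching direction: one pass indexes the patterns into a prefix set and an exact set, then instead of testing each pattern against the path it enumerates every prefix path[:i] of the path and looks it up in the prefix set by hash membership (plus one exact-set lookup for the whole path).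
import Mathlib
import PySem

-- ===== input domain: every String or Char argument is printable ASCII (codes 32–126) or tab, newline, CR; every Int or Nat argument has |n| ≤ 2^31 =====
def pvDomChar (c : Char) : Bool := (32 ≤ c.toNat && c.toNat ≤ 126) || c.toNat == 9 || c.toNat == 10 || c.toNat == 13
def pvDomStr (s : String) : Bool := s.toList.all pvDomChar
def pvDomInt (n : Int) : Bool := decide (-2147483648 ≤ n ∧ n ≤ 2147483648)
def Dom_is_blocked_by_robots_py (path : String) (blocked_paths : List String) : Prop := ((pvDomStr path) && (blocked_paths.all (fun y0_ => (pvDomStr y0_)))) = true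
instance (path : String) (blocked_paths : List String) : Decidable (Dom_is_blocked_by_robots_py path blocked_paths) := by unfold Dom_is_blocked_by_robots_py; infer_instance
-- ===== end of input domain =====

-- B inverts the matching direction: it indexes the patterns into two hash sets once, then tests each
-- prefix of the path by set membership instead of scanning the patterns against the path; alternative algorithm, return value proved equal.
-- ===== PORT A =====
def is_blocked_by_robots_py (path : String) (blocked_paths : List String) : Bool :=
  match blocked_paths with
  | [] => false
  | pattern :: rest =>
    if PySem.Str.endswith pattern "*" then
      if PySem.Str.startswith path (PySem.Str.slice pattern none (some (-1))) then true
      else is_blocked_by_robots_py path rest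
    else if PySem.Str.endswith pattern "$" then
      if path == PySem.Str.slice pattern none (some (-1)) then true
      else is_blocked_by_robots_py path rest
    else if PySem.Str.startswith path pattern then true
    else is_blocked_by_robots_py path rest

-- ===== PORT B =====
-- one classification step of Source B's build loop: add p (stripped as Source B does) to the prefix or exact set
def pvStep (st : PySem.Set String × PySem.Set String) (p : String) : PySem.Set String × PySem.Set String :=
  if PySem.Str.endswith p "*" then (PySem.Set.add st.1 (PySem.Str.slice p none (some (-1))), st.2)
  else if PySem.Str.endswith p "$" then (st.1, PySem.Set.add st.2 (PySem.Str.slice p none (some (-1))))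
  else (PySem.Set.add st.1 p, st.2)

def is_blocked_by_robots_py_alt (path : String) (blocked_paths : List String) : Bool :=
  let st := blocked_paths.foldl pvStep (PySem.Set.empty, PySem.Set.empty)
  if PySem.Set.contains st.2 path then true
  else (PySem.List.pyRange 0 ((PySem.Str.len path : Int) + 1) 1).any
        (fun i => PySem.Set.contains st.1 (PySem.Str.slice path none (some i)))

-- ===== PRECONDITION & SPEC =====
def Spec_is_blocked_by_robots_py (path : String) (blocked_paths : List String) (out : Bool) : Prop := out = is_blocked_by_robots_py_alt path blocked_paths
instance (path : String) (blocked_paths : List String) (out : Bool) : Decidable (Spec_is_blocked_by_robots_py path blocked_paths out) := by unfold Spec_is_blocked_by_robots_py; infer_instance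

-- ===== CLAIM (what is proved, stated in full; the proofs are below) =====
def Claim_equal_is_blocked_by_robots_py : Prop := ∀ (path : String) (blocked_paths : List String), Dom_is_blocked_by_robots_py path blocked_paths → Spec_is_blocked_by_robots_py path blocked_paths (is_blocked_by_robots_py path blocked_paths)

-- ===== LEMMAS AND PROOFS =====
-- per-pattern match predicate (proof helper only)
def pvMatch (path p : String) : Bool :=
  if PySem.Str.endswith p "*" then PySem.Str.startswith path (PySem.Str.slice p none (some (-1)))
  else if PySem.Str.endswith p "$" then path == PySem.Str.slice p none (some (-1))
  else PySem.Str.startswith path p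

lemma pvA_cons (path p : String) (rest : List String) :
    is_blocked_by_robots_py path (p :: rest)
      = (pvMatch path p || is_blocked_by_robots_py path rest) := by
  show (if PySem.Str.endswith p "*" then
      if PySem.Str.startswith path (PySem.Str.slice p none (some (-1))) then true
      else is_blocked_by_robots_py path rest
    else if PySem.Str.endswith p "$" then
      if path == PySem.Str.slice p none (some (-1)) then true
      else is_blocked_by_robots_py path rest
    else if PySem.Str.startswith path p then true
    else is_blocked_by_robots_py path rest) = _
  unfold pvMatch
  split_ifs <;> simp_all

lemma pvA_any (path : String) (l : List String) :
    is_blocked_by_robots_py path l = l.any (pvMatch path) := by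
  induction l with
  | nil => rfl
  | cons p rest ih => rw [pvA_cons, ih, List.any_cons]

-- startswith path pre ↔ pre equals some prefix path[:i], 0 ≤ i ≤ len(path)
lemma pv_startswith_iff_slice (path pre : String) :
    PySem.Str.startswith path pre = true ↔
      ∃ i : Int, 0 ≤ i ∧ i ≤ (PySem.Str.len path : Int) ∧ PySem.Str.slice path none (some i) = pre := by
  rw [PySem.Str.startswith_eq]
  constructor
  · intro h
    have hp : pre.toList <+: path.toList := (PySem.Chars.startswith_iff _ _).mp h
    refine ⟨(pre.toList.length : Int), by positivity, ?_, ?_⟩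
    · rw [PySem.Str.len_eq]; exact_mod_cast hp.length_le
    · apply String.toList_inj.mp
      rw [PySem.Str.toList_slice, PySem.Chars.slice_eq_listSlice,
        PySem.List.slice_to _ (Int.natCast_nonneg _), Int.toNat_natCast]
      exact (List.prefix_iff_eq_take.mp hp).symm
  · rintro ⟨i, hi0, hile, hsl⟩
    apply (PySem.Chars.startswith_iff _ _).mpr
    have h2 := congrArg String.toList hsl
    rw [PySem.Str.toList_slice, PySem.Chars.slice_eq_listSlice,
      PySem.List.slice_to _ hi0] at h2
    rw [← h2]
    exact List.take_prefix _ _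

-- membership in the built sets after the classification fold
lemma pv_fold_mem (l : List String) (st : PySem.Set String × PySem.Set String) (x : String) :
    (x ∈ (l.foldl pvStep st).1 ↔ x ∈ st.1 ∨ ∃ p ∈ l,
        (PySem.Str.endswith p "*" = true ∧ PySem.Str.slice p none (some (-1)) = x) ∨
        (PySem.Str.endswith p "*" = false ∧ PySem.Str.endswith p "$" = false ∧ p = x)) ∧
    (x ∈ (l.foldl pvStep st).2 ↔ x ∈ st.2 ∨ ∃ p ∈ l,
        PySem.Str.endswith p "*" = false ∧ PySem.Str.endswith p "$" = true ∧
        PySem.Str.slice p none (some (-1)) = x) := by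
  induction l generalizing st with
  | nil => simp
  | cons p rest ih =>
    rw [List.foldl_cons]
    constructor
    · rw [(ih (pvStep st p)).1]
      by_cases h1 : PySem.Str.endswith p "*" = true <;>
        by_cases h2 : PySem.Str.endswith p "$" = true <;>
          simp only [pvStep, h1, h2, if_true, PySem.Set.mem_add,
            List.mem_cons] <;> aesop
    · rw [(ih (pvStep st p)).2]
      by_cases h1 : PySem.Str.endswith p "*" = true <;>
        by_cases h2 : PySem.Str.endswith p "$" = true <;>
          simp only [pvStep, h1, h2, if_true,
            List.mem_cons] <;> aesop

-- ===== VERDICT (by name: the statement is the Claim_ definition above) =====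
-- A's any-pattern-matches test equals B's prefix-enumeration test, as propositions
lemma pv_main (path : String) (bps : List String) :
    bps.any (pvMatch path) = true ↔ is_blocked_by_robots_py_alt path bps = true := by
  have hP : (is_blocked_by_robots_py_alt path bps = true) ↔
      (path ∈ (bps.foldl pvStep (PySem.Set.empty, PySem.Set.empty)).2 ∨
       ∃ i ∈ PySem.List.pyRange 0 ((PySem.Str.len path : Int) + 1) 1,
         PySem.Str.slice path none (some i) ∈ (bps.foldl pvStep (PySem.Set.empty, PySem.Set.empty)).1) := by
    unfold is_blocked_by_robots_py_alt
    simp only [PySem.Set.contains]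
    split_ifs with hc <;> simp_all
  rw [hP, List.any_eq_true]
  constructor
  · rintro ⟨p, hp, hm⟩
    unfold pvMatch at hm
    by_cases h1 : PySem.Str.endswith p "*" = true
    · rw [if_pos h1] at hm
      obtain ⟨i, hi0, hile, hsl⟩ := (pv_startswith_iff_slice _ _).mp hm
      refine Or.inr ⟨i, PySem.List.mem_pyRange_one.mpr ⟨hi0, by omega⟩, ?_⟩
      exact ((pv_fold_mem bps _ _).1).mpr (Or.inr ⟨p, hp, Or.inl ⟨h1, hsl.symm⟩⟩)
    · by_cases h2 : PySem.Str.endswith p "$" = true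
      · rw [if_neg h1, if_pos h2] at hm
        exact Or.inl (((pv_fold_mem bps _ _).2).mpr
          (Or.inr ⟨p, hp, Bool.eq_false_iff.mpr h1, h2, (beq_iff_eq.mp hm).symm⟩))
      · rw [if_neg h1, if_neg h2] at hm
        obtain ⟨i, hi0, hile, hsl⟩ := (pv_startswith_iff_slice _ _).mp hm
        refine Or.inr ⟨i, PySem.List.mem_pyRange_one.mpr ⟨hi0, by omega⟩, ?_⟩
        exact ((pv_fold_mem bps _ _).1).mpr
          (Or.inr ⟨p, hp, Or.inr ⟨Bool.eq_false_iff.mpr h1, Bool.eq_false_iff.mpr h2, hsl.symm⟩⟩)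
  · rintro (hmem | ⟨i, hi, hmem⟩)
    · obtain ⟨p, hp, h1, h2, hsl⟩ :=
        (((pv_fold_mem bps _ path).2).mp hmem).resolve_left (by simp [PySem.Set.empty])
      refine ⟨p, hp, ?_⟩
      unfold pvMatch
      rw [if_neg (by rw [h1]; exact Bool.false_ne_true), if_pos h2]
      exact beq_iff_eq.mpr hsl.symm
    · rw [PySem.List.mem_pyRange_one] at hi
      obtain ⟨p, hp, hc⟩ :=
        (((pv_fold_mem bps _ _).1).mp hmem).resolve_left (by simp [PySem.Set.empty])
      refine ⟨p, hp, ?_⟩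
      unfold pvMatch
      rcases hc with ⟨h1, hsl⟩ | ⟨h1, h2, hpx⟩
      · rw [if_pos h1]
        exact (pv_startswith_iff_slice _ _).mpr ⟨i, hi.1, by omega, hsl.symm⟩
      · rw [if_neg (by rw [h1]; exact Bool.false_ne_true),
            if_neg (by rw [h2]; exact Bool.false_ne_true)]
        exact (pv_startswith_iff_slice _ _).mpr ⟨i, hi.1, by omega, hpx.symm⟩

-- ===== final verdict proof =====
theorem is_blocked_by_robots_py_spec : Claim_equal_is_blocked_by_robots_py := by
  intro path bps _
  unfold Spec_is_blocked_by_robots_py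
  rw [pvA_any]
  exact Bool.eq_iff_iff.mpr (by simpa using pv_main path bps)
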